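-- pv_equiv track=rewrite | github.com/kusano/cube | pp_pll/pp_pll.py | rotateColor
-- ===== SOURCE A (Python) =====
-- def rotateColor(F, n):
--     for _ in range(n):
--         F = F.replace("F", "x")
--         F = F.replace("L", "F")
--         F = F.replace("B", "L")
--         F = F.replace("R", "B")
--         F = F.replace("x", "R")
--     return F
-- ===== SOURCE B (Python) =====
-- def rotateColor(F, n):
--     if n <= 0:
--         return F
--     k = n % 4
--     src = "FRBL"
--     dst = src[k:] + src[:k]
--     table = dict(zip(src, dst))
--     return "".join(table.get(c, c) for c in F)
-- ===== Notes on version B (the rewrite author's own statement) =====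
-- stated objective: faster
-- what changed: Replaces the n-iteration loop of five chained str.replace passes by computing n mod 4 once and applying a single precomputed translation-table pass over the string.
-- intended difference: On inputs with n >= 1 whose string contains 'x' (A's temporary marker), A rotates each original 'x' as if it were 'F' (e.g. 'x' with n=1 becomes 'R'), while B leaves 'x' unchanged, which is the intended behaviour since 'x' is not a cube face letter. — e.g. on rotateColor("x", 1): A returns "R", B returns "x"
import Mathlib
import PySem

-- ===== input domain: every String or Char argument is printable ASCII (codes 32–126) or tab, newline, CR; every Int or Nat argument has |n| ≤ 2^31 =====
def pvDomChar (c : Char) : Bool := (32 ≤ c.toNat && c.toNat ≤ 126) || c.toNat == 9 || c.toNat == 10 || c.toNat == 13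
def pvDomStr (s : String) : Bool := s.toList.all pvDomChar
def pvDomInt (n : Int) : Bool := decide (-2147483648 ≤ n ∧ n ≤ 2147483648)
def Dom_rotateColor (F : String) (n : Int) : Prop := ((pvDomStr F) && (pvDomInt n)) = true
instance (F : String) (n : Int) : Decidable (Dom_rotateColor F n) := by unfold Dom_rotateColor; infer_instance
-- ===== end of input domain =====

-- B replaces A's n-fold five-replace loop by one translation pass built from n mod 4 (O(len) instead of O(n·len)).
-- A uses 'x' as a temporary marker, so original 'x' characters are mangled; B leaves them alone (see D_ below).

-- ===== PORT A =====
def rotateColorStep (F : String) : String :=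
  let F := PySem.Str.replace F "F" "x"
  let F := PySem.Str.replace F "L" "F"
  let F := PySem.Str.replace F "B" "L"
  let F := PySem.Str.replace F "R" "B"
  PySem.Str.replace F "x" "R"

def rotateColor (F : String) (n : Int) : String :=
  (PySem.List.pyRange 0 n 1).foldl (fun F _ => rotateColorStep F) F

-- ===== PORT B =====
def rotateColor_alt (F : String) (n : Int) : String :=
  if n ≤ 0 then F
  else
    let k := PySem.Int.mod n 4
    let src := "FRBL"
    let dst := PySem.Str.slice src (some k) none ++ PySem.Str.slice src none (some k)
    let table := PySem.Dict.ofList (List.zip src.toList dst.toList)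
    String.ofList (F.toList.map (fun c => table.getD c c))

-- ===== PRECONDITION & SPEC =====
-- On inputs with n ≥ 1 whose string contains 'x' — A's temporary marker — A turns each original 'x'
-- into the letter a rotated 'F' would become, while B leaves 'x' (not a face letter) unchanged,
-- which is the intended behaviour for a face-colour rotation.
def D_rotateColor (F : String) (n : Int) : Prop := 1 ≤ n ∧ 'x' ∈ F.toList
instance (F : String) (n : Int) : Decidable (D_rotateColor F n) := by unfold D_rotateColor; infer_instance

def Spec_rotateColor (F : String) (n : Int) (out : String) : Prop := ¬ D_rotateColor F n → out = rotateColor_alt F n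
instance (F : String) (n : Int) (out : String) : Decidable (Spec_rotateColor F n out) := by unfold Spec_rotateColor; infer_instance

def pvDiffWitness_rotateColor : String × Int := ("x", 1)
def pvDiffWitnessOut_rotateColor : String × String := ("R", "x")

-- ===== CLAIM (what is proved, stated in full; the proofs are below) =====
def Claim_unchanged_rotateColor : Prop := ∀ (F : String) (n : Int), Dom_rotateColor F n → Spec_rotateColor F n (rotateColor F n)
def Claim_changed_rotateColor : Prop := Dom_rotateColor (pvDiffWitness_rotateColor.1) (pvDiffWitness_rotateColor.2) ∧ D_rotateColor (pvDiffWitness_rotateColor.1) (pvDiffWitness_rotateColor.2) ∧ rotateColor (pvDiffWitness_rotateColor.1) (pvDiffWitness_rotateColor.2) = pvDiffWitnessOut_rotateColor.1 ∧ rotateColor_alt (pvDiffWitness_rotateColor.1) (pvDiffWitness_rotateColor.2) = pvDiffWitnessOut_rotateColor.2 ∧ pvDiffWitnessOut_rotateColor.1 ≠ pvDiffWitnessOut_rotateColor.2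
def Claim_exact_rotateColor : Prop := ∀ (F : String) (n : Int), Dom_rotateColor F n → D_rotateColor F n → rotateColor F n ≠ rotateColor_alt F n

-- ===== LEMMAS AND PROOFS =====

-- the per-character effect of one pass of A's five replaces
def rot1 (c : Char) : Char :=
  if c = 'F' ∨ c = 'x' then 'R'
  else if c = 'L' then 'F'
  else if c = 'B' then 'L'
  else if c = 'R' then 'B'
  else c

-- the per-character effect of B's table for residue k
def gsel (k : Nat) (c : Char) : Char :=
  match k with
  | 1 => if c = 'F' then 'R' else if c = 'R' then 'B' else if c = 'B' then 'L' else if c = 'L' then 'F' else c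
  | 2 => if c = 'F' then 'B' else if c = 'R' then 'L' else if c = 'B' then 'F' else if c = 'L' then 'R' else c
  | 3 => if c = 'F' then 'L' else if c = 'R' then 'F' else if c = 'B' then 'R' else if c = 'L' then 'B' else c
  | _ => c

theorem replace_go_single (o n' : Char) (l : List Char) :
    ∀ (fuel : Nat) (acc : List Char), l.length ≤ fuel →
      PySem.Chars.replace.go [o] [n'] fuel l acc
        = acc.reverse ++ l.map (fun c => if c = o then n' else c) := by
  induction l with
  | nil =>
    intro fuel acc _
    cases fuel <;> simp [PySem.Chars.replace.go]
  | cons c t ih =>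
    intro fuel acc hfuel
    cases fuel with
    | zero => simp at hfuel
    | succ f =>
      have hpre : List.isPrefixOf [o] (c :: t) = (o == c) := by
        simp [List.isPrefixOf]
      have hft : t.length ≤ f := by
        simp only [List.length_cons] at hfuel; omega
      by_cases hoc : o = c
      · subst hoc
        rw [PySem.Chars.replace.go, hpre]
        simp only [beq_self_eq_true, if_true]
        rw [show List.drop [o].length (o :: t) = t from rfl,
            show ([n'] : List Char).reverse ++ acc = n' :: acc from rfl,
            ih f (n' :: acc) hft]
        simp
      · rw [PySem.Chars.replace.go, hpre]
        have hb : (o == c) = false := by simp [hoc]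
        simp only [hb, Bool.false_eq_true, if_false]
        rw [ih f (c :: acc) hft]
        have hco : ¬ c = o := fun h => hoc h.symm
        simp [hco]

theorem replace_single (o n' : Char) (l : List Char) :
    PySem.Chars.replace l [o] [n'] = l.map (fun c => if c = o then n' else c) := by
  rw [PySem.Chars.replace]
  simp only [List.isEmpty_cons, Bool.false_eq_true, if_false]
  simpa using replace_go_single o n' l l.length [] le_rfl

theorem step_toList (F : String) : (rotateColorStep F).toList = F.toList.map rot1 := by
  unfold rotateColorStep
  simp only [PySem.Str.toList_replace]
  have h1 : ("F" : String).toList = ['F'] := rfl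
  have h2 : ("x" : String).toList = ['x'] := rfl
  have h3 : ("L" : String).toList = ['L'] := rfl
  have h4 : ("B" : String).toList = ['B'] := rfl
  have h5 : ("R" : String).toList = ['R'] := rfl
  rw [h1, h2, h3, h4, h5]
  rw [replace_single, replace_single, replace_single, replace_single, replace_single]
  simp only [List.map_map]
  apply List.map_congr_left
  intro c _
  simp only [Function.comp]
  by_cases hF : c = 'F'
  · subst hF; rfl
  · by_cases hL : c = 'L'
    · subst hL; rfl
    · by_cases hB : c = 'B'
      · subst hB; rfl
      · by_cases hR : c = 'R'
        · subst hR; rfl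
        · by_cases hx : c = 'x'
          · subst hx; rfl
          · simp [rot1, hF, hL, hB, hR, hx]

theorem foldl_const_iterate {α : Type} (f : α → α) (l : List Int) (x : α) :
    l.foldl (fun a _ => f a) x = f^[l.length] x := by
  induction l generalizing x with
  | nil => rfl
  | cons y t ih => simp [List.foldl_cons, ih, Function.iterate_succ_apply]

theorem rotateColor_toList (F : String) (n : Int) :
    (rotateColor F n).toList = F.toList.map (rot1^[n.toNat]) := by
  unfold rotateColor
  rw [foldl_const_iterate]
  have hl : (PySem.List.pyRange 0 n 1).length = n.toNat := by
    rw [PySem.List.length_pyRange_one]; omega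
  rw [hl]
  induction n.toNat generalizing F with
  | zero => simp
  | succ m ih =>
    rw [Function.iterate_succ_apply, ih (rotateColorStep F), step_toList, List.map_map]
    apply List.map_congr_left
    intro c _
    simp [Function.iterate_succ_apply]

-- rot1 never produces 'x'
theorem rot1_ne_x (c : Char) : rot1 c ≠ 'x' ∨ c = 'x' := by
  by_cases hx : c = 'x'
  · right; exact hx
  · left
    unfold rot1
    split_ifs with h1 h2 h3 h4 <;> simp_all

theorem rot1_iter_eq_gsel (m : Nat) (c : Char) (hc : c ≠ 'x') :
    rot1^[m] c = gsel (m % 4) c := by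
  induction m generalizing c with
  | zero =>
    have : 0 % 4 = 0 := rfl
    rw [this]
    rfl
  | succ m ih =>
    rw [Function.iterate_succ_apply]
    have hnx : rot1 c ≠ 'x' := by
      rcases rot1_ne_x c with h | h
      · exact h
      · exact absurd h hc
    rw [ih (rot1 c) hnx]
    have h4 : m % 4 = 0 ∨ m % 4 = 1 ∨ m % 4 = 2 ∨ m % 4 = 3 := by omega
    by_cases hF : c = 'F'
    · subst hF; rcases h4 with h | h | h | h <;>
        (first
          | (have : (m+1) % 4 = 1 := by omega
             rw [h, this]; rfl)
          | (have : (m+1) % 4 = 2 := by omega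
             rw [h, this]; rfl)
          | (have : (m+1) % 4 = 3 := by omega
             rw [h, this]; rfl)
          | (have : (m+1) % 4 = 0 := by omega
             rw [h, this]; rfl))
    · by_cases hR : c = 'R'
      · subst hR; rcases h4 with h | h | h | h <;>
          (first
            | (have : (m+1) % 4 = 1 := by omega
               rw [h, this]; rfl)
            | (have : (m+1) % 4 = 2 := by omega
               rw [h, this]; rfl)
            | (have : (m+1) % 4 = 3 := by omega
               rw [h, this]; rfl)
            | (have : (m+1) % 4 = 0 := by omega
               rw [h, this]; rfl))
      · by_cases hB : c = 'B'
        · subst hB; rcases h4 with h | h | h | h <;>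
            (first
              | (have : (m+1) % 4 = 1 := by omega
                 rw [h, this]; rfl)
              | (have : (m+1) % 4 = 2 := by omega
                 rw [h, this]; rfl)
              | (have : (m+1) % 4 = 3 := by omega
                 rw [h, this]; rfl)
              | (have : (m+1) % 4 = 0 := by omega
                 rw [h, this]; rfl))
        · by_cases hL : c = 'L'
          · subst hL; rcases h4 with h | h | h | h <;>
              (first
                | (have : (m+1) % 4 = 1 := by omega
                   rw [h, this]; rfl)
                | (have : (m+1) % 4 = 2 := by omega
                   rw [h, this]; rfl)
                | (have : (m+1) % 4 = 3 := by omega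
                   rw [h, this]; rfl)
                | (have : (m+1) % 4 = 0 := by omega
                   rw [h, this]; rfl))
          · -- c is none of the four letters nor 'x': both sides are c
            have hr : rot1 c = c := by simp [rot1, hF, hR, hB, hL, hc]
            rw [hr]
            have hg : ∀ j, gsel j c = c := by
              intro j
              unfold gsel
              match j with
              | 0 => rfl
              | 1 => simp [hF, hR, hB, hL]
              | 2 => simp [hF, hR, hB, hL]
              | 3 => simp [hF, hR, hB, hL]
              | (j+4) => rfl
            rw [hg, hg]

-- B's table lookup is gsel of the residue
theorem alt_toList (F : String) (n : Int) (hn : 1 ≤ n) :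
    (rotateColor_alt F n).toList = F.toList.map (gsel (n.toNat % 4)) := by
  unfold rotateColor_alt
  rw [if_neg (by omega)]
  have hk : PySem.Int.mod n 4 = ((n.toNat % 4 : Nat) : Int) := by
    rw [PySem.Int.mod_eq_emod_of_pos (by omega)]
    omega
  have h4 : n.toNat % 4 = 0 ∨ n.toNat % 4 = 1 ∨ n.toNat % 4 = 2 ∨ n.toNat % 4 = 3 := by omega
  rcases h4 with h | h | h | h <;>
    · rw [hk, h]
      simp only [String.toList_ofList]
      apply List.map_congr_left
      intro c _
      by_cases hF : c = 'F'
      · subst hF; rfl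
      · by_cases hR : c = 'R'
        · subst hR; rfl
        · by_cases hB : c = 'B'
          · subst hB; rfl
          · by_cases hL : c = 'L'
            · subst hL; rfl
            · have : ∀ (d : PySem.Dict Char Char), d.keys = ['F','R','B','L'] → d.getD c c = c := by
                intro d hd
                apply PySem.Dict.getD_of_not_contains
                rw [PySem.Dict.contains_eq_decide_mem_keys, hd]
                simp [hF, hR, hB, hL]
              rw [this _ rfl]
              simp [gsel, hF, hR, hB, hL]

theorem rotateColor_eq_alt (F : String) (n : Int) (hn : 1 ≤ n) (hx : 'x' ∉ F.toList) :
    rotateColor F n = rotateColor_alt F n := by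
  apply String.toList_inj.mp
  rw [rotateColor_toList, alt_toList F n hn]
  apply List.map_congr_left
  intro c hcF
  exact rot1_iter_eq_gsel n.toNat c (fun h => hx (h ▸ hcF))

-- ===== VERDICT (by name: the statement is the Claim_ definition above) =====
theorem rotateColor_spec : Claim_unchanged_rotateColor := by
  intro F n _ hD
  by_cases hn : 1 ≤ n
  · have hx : 'x' ∉ F.toList := fun hm => hD ⟨hn, hm⟩
    exact (rotateColor_eq_alt F n hn hx).symm ▸ rfl
  · -- n ≤ 0: both sides are F
    have h0 : n ≤ 0 := by omega
    unfold rotateColor rotateColor_alt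
    rw [PySem.List.pyRange_one_eq_nil (by omega), if_pos h0]
    rfl

theorem rotateColor_changed : Claim_changed_rotateColor := by
  unfold Claim_changed_rotateColor; decide

theorem rotateColor_tight : Claim_exact_rotateColor := by
  intro F n _ hD heq
  obtain ⟨hn, hx⟩ := hD
  obtain ⟨i, hi, hci⟩ := List.mem_iff_getElem.mp hx
  have hA := rotateColor_toList F n
  have hB := alt_toList F n hn
  have hEq : (rotateColor F n).toList = (rotateColor_alt F n).toList := by rw [heq]
  rw [hA, hB] at hEq
  have hAi : (F.toList.map (rot1^[n.toNat]))[i]'(by simpa using hi)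
      = rot1^[n.toNat] 'x' := by simp [hci]
  have hBi : (F.toList.map (gsel (n.toNat % 4)))[i]'(by simpa using hi)
      = gsel (n.toNat % 4) 'x' := by simp [hci]
  have hgx : gsel (n.toNat % 4) 'x' = 'x' := by
    have h4 : n.toNat % 4 = 0 ∨ n.toNat % 4 = 1 ∨ n.toNat % 4 = 2 ∨ n.toNat % 4 = 3 := by omega
    rcases h4 with h | h | h | h <;> rw [h] <;> rfl
  have hne : rot1^[n.toNat] 'x' ≠ 'x' := by
    obtain ⟨m, hm⟩ : ∃ m, n.toNat = m + 1 := ⟨n.toNat - 1, by omega⟩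
    rw [hm, Function.iterate_succ_apply]
    have hR : rot1 'x' = 'R' := rfl
    rw [hR, rot1_iter_eq_gsel m 'R' (by decide)]
    have h4 : m % 4 = 0 ∨ m % 4 = 1 ∨ m % 4 = 2 ∨ m % 4 = 3 := by omega
    rcases h4 with h | h | h | h <;> rw [h] <;> decide
  apply hne
  rw [← hAi, ← hgx, ← hBi]
  simp only [hEq]
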